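-- pv_equiv track=rewrite | github.com/J-Ngaiii/datastructures | scripts/fav.py | get_min_changes
-- ===== SOURCE A (Python) =====
-- from collections import defaultdict, Counter
--
-- def get_min_changes(s: str, k: int):
--     """
--     My solution to the Password Palindrome problem which is in the docstring of the function above.
--
--     The problem is solved by initiating it as a graph traversal problem.
--     We define each character as a node, connect them based on the palindrome and k-periodicity restrictions
--     then traverse the graph to find all the groups of connected nodes.
--
--     What's elegant about the problem is the fact that the wider problem (minimizng character mutations for the whole string)
--     can be solved by solving individual subproblems (minimizing character mutations for groups of characters).
--
--     This is because the nodes connected into groups by the palindrome and k-periodicity restrictions form disjointly seperable groups.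
--     """
--     n = len(s)
--     adj = defaultdict(list)
--
--     for i in range(n): # this creates groupings of nodes
--         # create an edge based on palindrome connection (i connects to n - 1 - i)
--         target_palindrome = n - 1 - i
--         if i != target_palindrome:
--             adj[i].append(target_palindrome)
--             adj[target_palindrome].append(i)
--
--         # create an edge based on k-periodicity connection (i connects to i + k)
--         if i + k < n:
--             adj[i].append(i + k)
--             adj[i + k].append(i)
--             # we only make this call once because the for loop above will loop to the
--             # (i + k)th node on its own then that loop iteration will create the next edge
--
--     # traverse the graph to find groupings of nodes
--     visited = [False] * n
--     total_changes = 0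
--
--     for i in range(n):
--         if not visited[i]:
--             # visited is for tracking entire groups of nodes
--             component_chars = []
--             stack = [i]
--             visited[i] = True
--
--             # traversal is for retrieving every node/index/char in a node group
--             while stack:
--                 curr = stack.pop()
--                 component_chars.append(s[curr])
--
--                 for neighbor in adj[curr]:
--                     if not visited[neighbor]:
--                         visited[neighbor] = True
--                         stack.append(neighbor)
--
--             # once we have a group we make all chars the same
--             # min number of changes by mutating all chars to the most frequently appearding char
--             count = Counter(component_chars)
--             most_common_freq = count.most_common(1)[0][1]
--             group_size = len(component_chars)
--             changes_needed = group_size - most_common_freq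
--
--             total_changes += changes_needed
--
--     return total_changes
-- ===== SOURCE B (Python) =====
-- from collections import Counter
--
-- def get_min_changes(s: str, k: int):
--     # Closed form for the connected groups: with period k >= 1 every index chain
--     # i, i+k, i+2k, ... shares residue i % k, and the palindrome mirror sends
--     # residue class r onto residue class (n-1-r) % k, so each group is exactly
--     # the set of indices whose residue lies in {r, (n-1-r) % k}; label each index
--     # by the smaller of the two.  For k == 0 the only edges are the mirror pairs.
--     n = len(s)
--     groups = {}
--     for i, ch in enumerate(s):
--         key = min(i % k, (n - 1 - i) % k) if k >= 1 else min(i, n - 1 - i)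
--         groups.setdefault(key, []).append(ch)
--     total = 0
--     for chars in groups.values():
--         total += len(chars) - max(Counter(chars).values())
--     return total
-- ===== Notes on version B (the rewrite author's own statement) =====
-- stated objective: faster
-- what changed: Replaces the explicit adjacency-list graph build plus stack-based DFS component search with a single pass that labels each index by the closed-form component key min(i % k, (n-1-i) % k) (min(i, n-1-i) when k <= 0), groups characters by that label, and sums len(group) - max frequency per group.
-- outside the precondition, e.g. on get_min_changes('abc', -2): A returns 2, B returns 1; on get_min_changes('a', -5): A raises IndexError, B returns 0
import Mathlib
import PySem

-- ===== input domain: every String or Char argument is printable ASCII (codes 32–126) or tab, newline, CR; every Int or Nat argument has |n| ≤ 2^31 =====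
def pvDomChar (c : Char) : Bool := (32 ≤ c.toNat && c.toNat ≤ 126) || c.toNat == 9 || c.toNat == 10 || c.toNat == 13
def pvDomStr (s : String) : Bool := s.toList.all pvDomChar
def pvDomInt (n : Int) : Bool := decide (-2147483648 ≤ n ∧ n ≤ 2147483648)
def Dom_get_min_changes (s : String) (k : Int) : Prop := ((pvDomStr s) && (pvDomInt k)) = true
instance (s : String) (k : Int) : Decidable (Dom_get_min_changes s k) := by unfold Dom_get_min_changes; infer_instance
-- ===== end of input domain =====

-- B replaces A's adjacency-list build + stack DFS by a one-pass closed-form component label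
-- min(i % k, (n-1-i) % k); equivalence is proved for k ≥ 0 (Pre_), the function's natural domain.

-- ===== PORT A =====

-- termination measure lemma for the DFS inner loop (cited by dfsA's decreasing_by)
theorem pvCountSet (v : List Bool) (j : Nat) (hj : j < v.length) (hf : v[j]! = false) :
    (v.set j true).count false + 1 = v.count false := by
  induction v generalizing j with
  | nil => simp at hj
  | cons x xs ih =>
      cases j with
      | zero =>
          simp [getElem!_pos] at hf
          simp [hf, List.count_cons]
      | succ m =>
          have hm : m < xs.length := by simpa using hj
          have hf' : xs[m]! = false := by
            simpa [getElem!_pos, hm, List.getElem_cons_succ] using hf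
          have := ih m hm hf'
          simp [List.set_cons_succ, List.count_cons]
          omega

theorem pvPushStep (v : List Bool) (nb : Int) (h : PySem.List.pyGetD v nb true = false) :
    (PySem.List.pySetD v nb true).count false + 1 = v.count false ∧
    (PySem.List.pySetD v nb true).length = v.length := by
  simp only [PySem.List.pyGetD, PySem.List.pyGet?, PySem.List.pySetD, PySem.List.pySet?] at *
  cases hidx : PySem.List.pyIdx? v.length nb with
  | none => simp [hidx] at h
  | some j =>
      have hj : j < v.length := by
        by_contra hge
        simp [hidx, List.getElem?_eq_none (by omega : v.length ≤ j)] at h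
      have hvj : v[j]! = false := by
        simp [hidx, List.getElem?_eq_getElem hj] at h
        simpa [getElem!_pos, hj] using h
      refine ⟨?_, by simp [hidx]⟩
      simpa [hidx] using pvCountSet v j hj hvj

theorem pvFoldMeasure (ns : List Int) (v : List Bool) (st : List Int) :
    2 * ((ns.foldl (fun (p : List Bool × List Int) nb =>
        if PySem.List.pyGetD p.1 nb true = false then
          (PySem.List.pySetD p.1 nb true, nb :: p.2)
        else p) (v, st)).1.count false) +
      ((ns.foldl (fun (p : List Bool × List Int) nb =>
        if PySem.List.pyGetD p.1 nb true = false then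
          (PySem.List.pySetD p.1 nb true, nb :: p.2)
        else p) (v, st)).2.length) ≤ 2 * v.count false + st.length := by
  induction ns generalizing v st with
  | nil => simp
  | cons nb ns ih =>
      simp only [List.foldl_cons]
      by_cases h : PySem.List.pyGetD v nb true = false
      · have hc := (pvPushStep v nb h).1
        simpa [h] using le_trans (ih (PySem.List.pySetD v nb true) (nb :: st)) (by simp; omega)
      · simpa [h] using ih v st

-- the Python 'while stack:' loop; the stack is held head-first (Python appends and pops at the
-- list's end).  s[curr] / visited[neighbor] are read with pyGetD (exact inside Pre_, where every
-- stacked index is in range).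
def dfsA (cs : List Char) (adj : PySem.Dict Int (List Int)) :
    List Bool → List Int → List Char → List Bool × List Char
  | visited, [], comp => (visited, comp)
  | visited, curr :: rest, comp =>
      let comp' := comp ++ [PySem.List.pyGetD cs curr ' ']
      let p := (adj.getD curr []).foldl
        (fun (p : List Bool × List Int) nb =>
          if PySem.List.pyGetD p.1 nb true = false then
            (PySem.List.pySetD p.1 nb true, nb :: p.2)
          else p) (visited, rest)
      dfsA cs adj p.1 p.2 comp'
termination_by visited stack _ => 2 * visited.count false + stack.length
decreasing_by
  exact Nat.lt_succ_of_le (by simpa using pvFoldMeasure (adj.getD curr []) visited rest)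

def get_min_changes (s : String) (k : Int) : Int :=
  let cs := s.toList
  let n : Int := PySem.Str.len s
  -- adjacency build: defaultdict(list) with two appends per edge direction
  let adj : PySem.Dict Int (List Int) :=
    (PySem.List.pyRange 0 n 1).foldl (fun adj i =>
      let t := n - 1 - i
      let adj := if i ≠ t then (adj.modify i [] (· ++ [t])).modify t [] (· ++ [i]) else adj
      if i + k < n then (adj.modify i [] (· ++ [i + k])).modify (i + k) [] (· ++ [i]) else adj)
      PySem.Dict.empty
  -- outer scan: visited array + running total
  let r := (PySem.List.pyRange 0 n 1).foldl (fun (st : List Bool × Int) i =>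
      if PySem.List.pyGetD st.1 i true = false then
        let v1 := PySem.List.pySetD st.1 i true
        let res := dfsA cs adj v1 [i] []
        -- Counter(component_chars).most_common(1)[0][1] is the maximal count
        let cnt : PySem.Dict Char Int := PySem.Dict.counter res.2
        let mcf := (PySem.List.max? cnt.values (fun x => x)).getD 0
        (res.1, st.2 + ((res.2.length : Int) - mcf))
      else st) (List.replicate cs.length false, 0)
  r.2

-- ===== PORT B =====

def get_min_changes_alt (s : String) (k : Int) : Int :=
  let cs := s.toList
  let n : Int := PySem.Str.len s
  -- one grouping pass: groups.setdefault(key, []).append(ch)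
  let groups : PySem.Dict Int (List Char) :=
    (PySem.List.enumerate cs 0).foldl (fun g p =>
      let key := if 1 ≤ k then
          min (PySem.Int.mod p.1 k) (PySem.Int.mod (n - 1 - p.1) k)
        else min p.1 (n - 1 - p.1)
      g.modify key [] (· ++ [p.2])) PySem.Dict.empty
  -- max(Counter(chars).values()) — every group is nonempty, so the default is never read
  groups.values.foldl (fun tot chars =>
      tot + ((chars.length : Int)
        - (PySem.List.max? (PySem.Dict.counter chars).values (fun x => x)).getD 0)) 0

-- ===== PRECONDITION & SPEC =====
-- Pre_ excludes negative k, outside the natural domain of a periodicity parameter: there A's DFS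
-- follows negative neighbour indices, so its result is an accident of Python's negative-index
-- wraparound, and A raises IndexError as soon as k < -len(s).
def Pre_get_min_changes (s : String) (k : Int) : Prop := 0 ≤ k
instance (s : String) (k : Int) : Decidable (Pre_get_min_changes s k) := by
  unfold Pre_get_min_changes; infer_instance

def pvWitness_get_min_changes : String × Int := ("abacab", 2)

def Spec_get_min_changes (s : String) (k : Int) (out : Int) : Prop := out = get_min_changes_alt s k
instance (s : String) (k : Int) (out : Int) : Decidable (Spec_get_min_changes s k out) := by
  unfold Spec_get_min_changes; infer_instance

-- ===== CLAIM (what is proved, stated in full; the proofs are below) =====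
def Claim_equal_get_min_changes : Prop := ∀ (s : String) (k : Int), Dom_get_min_changes s k → Pre_get_min_changes s k → Spec_get_min_changes s k (get_min_changes s k)

-- ===== LEMMAS AND PROOFS =====

-- ---------- proof-side vocabulary ----------

def pvLab (n k x : Int) : Int :=
  if 1 ≤ k then min (PySem.Int.mod x k) (PySem.Int.mod (n - 1 - x) k)
  else min x (n - 1 - x)
def pvE (n k x y : Int) : Prop :=
  (0 ≤ x ∧ x < n ∧ y = n - 1 - x ∧ x ≠ y) ∨
  (0 ≤ y ∧ y < n ∧ x = n - 1 - y ∧ x ≠ y) ∨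
  (0 ≤ x ∧ x < n ∧ y = x + k ∧ y < n) ∨
  (0 ≤ y ∧ y < n ∧ x = y + k ∧ x < n)
def pvReach (n k : Int) : Int → Int → Prop := Relation.ReflTransGen (pvE n k)

def pvEpart (n k m x y : Int) : Prop :=
  (0 ≤ x ∧ x < m ∧ y = n - 1 - x ∧ x ≠ y) ∨
  (0 ≤ y ∧ y < m ∧ x = n - 1 - y ∧ x ≠ y) ∨
  (0 ≤ x ∧ x < m ∧ y = x + k ∧ y < n) ∨
  (0 ≤ y ∧ y < m ∧ x = y + k ∧ x < n)

def pvAdjUpTo (n k m : Int) : PySem.Dict Int (List Int) :=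
  (PySem.List.pyRange 0 m 1).foldl (fun adj i =>
      let t := n - 1 - i
      let adj := if i ≠ t then (adj.modify i [] (· ++ [t])).modify t [] (· ++ [i]) else adj
      if i + k < n then (adj.modify i [] (· ++ [i + k])).modify (i + k) [] (· ++ [i]) else adj)
      PySem.Dict.empty

def pvStep (p : List Bool × List Int) (nb : Int) : List Bool × List Int :=
  if PySem.List.pyGetD p.1 nb true = false then (PySem.List.pySetD p.1 nb true, nb :: p.2) else p

def pvCharAt (cs : List Char) (x : Int) : Char := PySem.List.pyGetD cs x ' '

-- the characters of the component labelled c, in index order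
def pvChars (cs : List Char) (k c : Int) : List Char :=
  (((PySem.List.pyRange 0 (cs.length : Int) 1).filter
      (fun j => pvLab (cs.length : Int) k j == c))).map (pvCharAt cs)

def pvCost (l : List Char) : Int :=
  (l.length : Int) - (PySem.List.max? (PySem.Dict.counter l).values (fun x => x)).getD 0

-- A's outer loop (the body of get_min_changes after the adjacency build)
def pvOuterFold (cs : List Char) (k m : Int) : List Bool × Int :=
  (PySem.List.pyRange 0 m 1).foldl (fun (st : List Bool × Int) i =>
      if PySem.List.pyGetD st.1 i true = false then
        let v1 := PySem.List.pySetD st.1 i true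
        let res := dfsA cs (pvAdjUpTo (cs.length : Int) k (cs.length : Int)) v1 [i] []
        let cnt : PySem.Dict Char Int := PySem.Dict.counter res.2
        let mcf := (PySem.List.max? cnt.values (fun x => x)).getD 0
        (res.1, st.2 + ((res.2.length : Int) - mcf))
      else st) (List.replicate cs.length false, 0)

def pvTotal (cs : List Char) (k : Int) (labs : List Int) : Int :=
  labs.foldl (fun t c => t + pvCost (pvChars cs k c)) 0

-- ---------- bridges ----------

theorem pvGetBridge {α : Type} (v : List α) (x : Int) (d : α) (h0 : 0 ≤ x) :
    PySem.List.pyGetD v x d = v.getD x.toNat d := by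
  simp [PySem.List.pyGetD, PySem.List.pyGet?_of_nonneg v h0, List.getD_eq_getElem?_getD]
theorem pvGetDD {α : Type} (v : List α) (j : Nat) (h : j < v.length) (d d' : α) :
    v.getD j d = v.getD j d' := by
  rw [List.getD_eq_getElem v d h, List.getD_eq_getElem v d' h]
theorem pvSetGetD {α : Type} (v : List α) (i j : Nat) (w : α) (d : α) (hi : i < v.length) :
    (v.set i w).getD j d = if j = i then w else v.getD j d := by
  rw [List.getD_eq_getElem?_getD, List.getD_eq_getElem?_getD, List.getElem?_set]
  split_ifs with h1 h2 h3
  · simp [hi]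
  · omega
  · omega
  · rfl

theorem pvA_eq_outer (s : String) (k : Int) :
    get_min_changes s k = (pvOuterFold s.toList k (s.toList.length : Int)).2 := rfl

-- ---------- adjacency characterisation ----------

theorem pvMemModify (d : PySem.Dict Int (List Int)) (a b x y : Int) :
    y ∈ ((d.modify a [] (· ++ [b])).getD x []) ↔ (y ∈ d.getD x [] ∨ (x = a ∧ y = b)) := by
  rw [PySem.Dict.getD_modify]
  split_ifs with h
  · subst h; simp
  · simp [h]

theorem pvAdjUpTo_succ (n k : Int) (m : Nat) :
    pvAdjUpTo n k ((m : Int) + 1)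
      = (if (m:Int) + k < n
           then ((if (m:Int) ≠ n - 1 - (m:Int)
             then ((pvAdjUpTo n k (m:Int)).modify (m:Int) [] (· ++ [n - 1 - (m:Int)])).modify (n - 1 - (m:Int)) [] (· ++ [(m:Int)])
             else pvAdjUpTo n k (m:Int)).modify (m:Int) [] (· ++ [(m:Int) + k])).modify ((m:Int) + k) [] (· ++ [(m:Int)])
           else (if (m:Int) ≠ n - 1 - (m:Int)
             then ((pvAdjUpTo n k (m:Int)).modify (m:Int) [] (· ++ [n - 1 - (m:Int)])).modify (n - 1 - (m:Int)) [] (· ++ [(m:Int)])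
             else pvAdjUpTo n k (m:Int))) := by
  unfold pvAdjUpTo
  rw [PySem.List.pyRange_one_succ_right (by omega : (0:Int) ≤ (m:Int)), List.foldl_append]
  rfl

set_option maxHeartbeats 1000000 in

theorem pvEpart_mono (n k m x y : Int) (h : pvEpart n k m x y) : pvEpart n k (m+1) x y := by
  unfold pvEpart at h ⊢
  rcases h with ⟨h1,h2,h3,h4⟩|⟨h1,h2,h3,h4⟩|⟨h1,h2,h3,h4⟩|⟨h1,h2,h3,h4⟩
  · exact Or.inl ⟨h1, by omega, h3, h4⟩
  · exact Or.inr (Or.inl ⟨h1, by omega, h3, h4⟩)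
  · exact Or.inr (Or.inr (Or.inl ⟨h1, by omega, h3, h4⟩))
  · exact Or.inr (Or.inr (Or.inr ⟨h1, by omega, h3, h4⟩))

theorem pvEpart_succ_elim (n k m x y : Int) (hm : 0 ≤ m) (h : pvEpart n k (m+1) x y) :
    pvEpart n k m x y
    ∨ (x = m ∧ y = n - 1 - m ∧ x ≠ y)
    ∨ (x = n - 1 - m ∧ y = m ∧ x ≠ y)
    ∨ (x = m ∧ y = m + k ∧ y < n)
    ∨ (x = m + k ∧ y = m ∧ x < n) := by
  unfold pvEpart at h ⊢
  rcases h with ⟨h1,h2,h3,h4⟩|⟨h1,h2,h3,h4⟩|⟨h1,h2,h3,h4⟩|⟨h1,h2,h3,h4⟩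
  · by_cases hx : x < m
    · exact Or.inl (Or.inl ⟨h1, hx, h3, h4⟩)
    · exact Or.inr (Or.inl ⟨by omega, by omega, h4⟩)
  · by_cases hy : y < m
    · exact Or.inl (Or.inr (Or.inl ⟨h1, hy, h3, h4⟩))
    · exact Or.inr (Or.inr (Or.inl ⟨by omega, by omega, h4⟩))
  · by_cases hx : x < m
    · exact Or.inl (Or.inr (Or.inr (Or.inl ⟨h1, hx, h3, h4⟩)))
    · exact Or.inr (Or.inr (Or.inr (Or.inl ⟨by omega, by omega, h4⟩)))
  · by_cases hy : y < m
    · exact Or.inl (Or.inr (Or.inr (Or.inr ⟨h1, hy, h3, h4⟩)))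
    · exact Or.inr (Or.inr (Or.inr (Or.inr ⟨by omega, by omega, h4⟩)))

theorem pvEpart_intro1 (n k m x y : Int) (hm : 0 ≤ m) (h : x = m ∧ y = n - 1 - m ∧ x ≠ y) :
    pvEpart n k (m+1) x y := Or.inl ⟨by omega, by omega, by omega, by omega⟩
theorem pvEpart_intro2 (n k m x y : Int) (hm : 0 ≤ m) (h : x = n - 1 - m ∧ y = m ∧ x ≠ y) :
    pvEpart n k (m+1) x y := Or.inr (Or.inl ⟨by omega, by omega, by omega, by omega⟩)
theorem pvEpart_intro3 (n k m x y : Int) (hm : 0 ≤ m) (h : x = m ∧ y = m + k ∧ y < n) :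
    pvEpart n k (m+1) x y := Or.inr (Or.inr (Or.inl ⟨by omega, by omega, by omega, by omega⟩))
theorem pvEpart_intro4 (n k m x y : Int) (hm : 0 ≤ m) (h : x = m + k ∧ y = m ∧ x < n) :
    pvEpart n k (m+1) x y := Or.inr (Or.inr (Or.inr ⟨by omega, by omega, by omega, by omega⟩))

theorem pvAdj_mem_upto (n k : Int) (m : Nat) :
    ∀ x y : Int, y ∈ (pvAdjUpTo n k (m : Int)).getD x [] ↔ pvEpart n k (m : Int) x y := by
  induction m with
  | zero =>
      intro x y
      simp [pvAdjUpTo, PySem.List.pyRange_one_eq_nil (by omega : (0:Int) ≤ 0), pvEpart]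
      omega
  | succ m ih =>
      intro x y
      have hc : (((m+1 : Nat)) : Int) = (m:Int)+1 := by push_cast; ring
      have hm : (0:Int) ≤ (m:Int) := by omega
      rw [hc, pvAdjUpTo_succ]
      by_cases hpal : (m:Int) ≠ n - 1 - (m:Int) <;> by_cases hper : (m:Int) + k < n
      · rw [if_pos hper, if_pos hpal]
        simp only [pvMemModify, ih]
        constructor
        · rintro ((((hP|⟨hx,hy⟩)|⟨hx,hy⟩)|⟨hx,hy⟩)|⟨hx,hy⟩)
          · exact pvEpart_mono _ _ _ _ _ hP
          · exact pvEpart_intro1 _ _ _ _ _ hm ⟨hx, hy, by omega⟩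
          · exact pvEpart_intro2 _ _ _ _ _ hm ⟨hx, hy, by omega⟩
          · exact pvEpart_intro3 _ _ _ _ _ hm ⟨hx, hy, by omega⟩
          · exact pvEpart_intro4 _ _ _ _ _ hm ⟨hx, hy, by omega⟩
        · intro h
          rcases pvEpart_succ_elim _ _ _ _ _ hm h with
            hP|⟨hx,hy,_⟩|⟨hx,hy,_⟩|⟨hx,hy,_⟩|⟨hx,hy,_⟩
          · exact Or.inl (Or.inl (Or.inl (Or.inl hP)))
          · exact Or.inl (Or.inl (Or.inl (Or.inr ⟨hx,hy⟩)))
          · exact Or.inl (Or.inl (Or.inr ⟨hx,hy⟩))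
          · exact Or.inl (Or.inr ⟨hx,hy⟩)
          · exact Or.inr ⟨hx,hy⟩
      · rw [if_neg hper, if_pos hpal]
        simp only [pvMemModify, ih]
        constructor
        · rintro ((hP|⟨hx,hy⟩)|⟨hx,hy⟩)
          · exact pvEpart_mono _ _ _ _ _ hP
          · exact pvEpart_intro1 _ _ _ _ _ hm ⟨hx, hy, by omega⟩
          · exact pvEpart_intro2 _ _ _ _ _ hm ⟨hx, hy, by omega⟩
        · intro h
          rcases pvEpart_succ_elim _ _ _ _ _ hm h with
            hP|⟨hx,hy,_⟩|⟨hx,hy,_⟩|⟨hx,hy,hlt⟩|⟨hx,hy,hlt⟩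
          · exact Or.inl (Or.inl hP)
          · exact Or.inl (Or.inr ⟨hx,hy⟩)
          · exact Or.inr ⟨hx,hy⟩
          · exact absurd hlt (by omega)
          · exact absurd hlt (by omega)
      · rw [if_pos hper, if_neg hpal]
        simp only [pvMemModify, ih]
        constructor
        · rintro ((hP|⟨hx,hy⟩)|⟨hx,hy⟩)
          · exact pvEpart_mono _ _ _ _ _ hP
          · exact pvEpart_intro3 _ _ _ _ _ hm ⟨hx, hy, by omega⟩
          · exact pvEpart_intro4 _ _ _ _ _ hm ⟨hx, hy, by omega⟩
        · intro h
          rcases pvEpart_succ_elim _ _ _ _ _ hm h with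
            hP|⟨hx,hy,hne⟩|⟨hx,hy,hne⟩|⟨hx,hy,_⟩|⟨hx,hy,_⟩
          · exact Or.inl (Or.inl hP)
          · exact absurd (by omega) hne
          · exact absurd (by omega) hne
          · exact Or.inl (Or.inr ⟨hx,hy⟩)
          · exact Or.inr ⟨hx,hy⟩
      · rw [if_neg hper, if_neg hpal]
        simp only [pvMemModify, ih]
        constructor
        · intro hP
          exact pvEpart_mono _ _ _ _ _ hP
        · intro h
          rcases pvEpart_succ_elim _ _ _ _ _ hm h with
            hP|⟨hx,hy,hne⟩|⟨hx,hy,hne⟩|⟨hx,hy,hlt⟩|⟨hx,hy,hlt⟩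
          · exact hP
          · exact absurd (by omega) hne
          · exact absurd (by omega) hne
          · exact absurd hlt (by omega)
          · exact absurd hlt (by omega)

theorem pvAdj_mem (n k : Int) (hn : 0 ≤ n) :
    ∀ x y : Int, y ∈ (pvAdjUpTo n k n).getD x [] ↔ pvE n k x y := by
  intro x y
  have h := pvAdj_mem_upto n k n.toNat x y
  rw [Int.toNat_of_nonneg hn] at h
  exact h.trans (by unfold pvEpart pvE; exact Iff.rfl)

theorem pvE_range (n k x y : Int) (hk : 0 ≤ k) (h : pvE n k x y) :
    0 ≤ x ∧ x < n ∧ 0 ≤ y ∧ y < n := by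
  unfold pvE at h; omega

theorem pvE_symm (n k : Int) : Symmetric (pvE n k) := by
  intro x y h
  unfold pvE at h ⊢
  rcases h with h|h|h|h
  · exact Or.inr (Or.inl ⟨h.1, h.2.1, by omega, by omega⟩)
  · exact Or.inl ⟨h.1, h.2.1, by omega, by omega⟩
  · exact Or.inr (Or.inr (Or.inr ⟨h.1, h.2.1, by omega, by omega⟩))
  · exact Or.inr (Or.inr (Or.inl ⟨h.1, h.2.1, by omega, by omega⟩))

theorem pvModAdd (a k : Int) (hk : 1 ≤ k) : PySem.Int.mod (a + k) k = PySem.Int.mod a k := by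
  rw [PySem.Int.mod_eq_emod_of_pos (by omega), PySem.Int.mod_eq_emod_of_pos (by omega)]
  conv_lhs => rw [show a + k = a + k * 1 by ring]
  exact Int.add_mul_emod_self_left a k 1

theorem pvLab_pres (n k x y : Int) (hk : 0 ≤ k) (h : pvE n k x y) :
    pvLab n k x = pvLab n k y := by
  unfold pvLab
  by_cases h1 : 1 ≤ k
  · simp only [if_pos h1]
    unfold pvE at h
    rcases h with h|h|h|h
    · rw [show y = n - 1 - x by omega, show n - 1 - (n - 1 - x) = x by ring, min_comm]
    · rw [show x = n - 1 - y by omega, show n - 1 - (n - 1 - y) = y by ring, min_comm]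
    · rw [show y = x + k by omega, pvModAdd x k h1,
        show n - 1 - (x + k) = (n - 1 - x - k) by ring,
        show n - 1 - x = (n - 1 - x - k) + k by ring, pvModAdd (n - 1 - x - k) k h1,
        show n - 1 - x - k + k = n - 1 - x by ring]
    · rw [show x = y + k by omega, pvModAdd y k h1,
        show n - 1 - (y + k) = (n - 1 - y - k) by ring,
        show n - 1 - y = (n - 1 - y - k) + k by ring, pvModAdd (n - 1 - y - k) k h1,
        show n - 1 - y - k + k = n - 1 - y by ring]
  · simp only [if_neg h1]
    have hk0 : k = 0 := by omega
    subst hk0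
    unfold pvE at h
    rcases h with h|h|h|h
    · rw [show y = n - 1 - x by omega, show n - 1 - (n - 1 - x) = x by ring, min_comm]
    · rw [show x = n - 1 - y by omega, show n - 1 - (n - 1 - y) = y by ring, min_comm]
    · rw [show y = x + 0 by omega]; ring_nf
    · rw [show x = y + 0 by omega]; ring_nf

theorem pvReach_mod (n k : Int) (hk : 1 ≤ k) :
    ∀ (m : Nat) (x : Int), x.toNat = m → 0 ≤ x → x < n →
      pvReach n k x (PySem.Int.mod x k) := by
  intro m
  induction m using Nat.strong_induction_on with
  | _ m ih =>
    intro x hm h0 hn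
    by_cases hxk : x < k
    · rw [PySem.Int.mod_eq_emod_of_pos (by omega), Int.emod_eq_of_lt h0 hxk]
      exact Relation.ReflTransGen.refl
    · have hedge : pvE n k x (x - k) := by
        unfold pvE
        exact Or.inr (Or.inr (Or.inr ⟨by omega, by omega, by ring, hn⟩))
      have hrec := ih (x - k).toNat (by omega) (x - k) rfl (by omega) (by omega)
      have hmod : PySem.Int.mod (x - k) k = PySem.Int.mod x k := by
        rw [show x = (x - k) + k by ring, pvModAdd (x - k) k hk]
        ring_nf
      rw [← hmod]
      exact Relation.ReflTransGen.head hedge hrec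

theorem pvReach_lab (n k x : Int) (hk : 0 ≤ k) (h0 : 0 ≤ x) (hx : x < n) :
    pvReach n k x (pvLab n k x) := by
  have hmirror : pvReach n k x (n - 1 - x) := by
    by_cases hx2 : x = n - 1 - x
    · rw [← hx2]
      exact Relation.ReflTransGen.refl
    · exact Relation.ReflTransGen.single (Or.inl ⟨h0, hx, rfl, hx2⟩)
  unfold pvLab
  by_cases h1 : 1 ≤ k
  · simp only [if_pos h1]
    have r1 := pvReach_mod n k h1 x.toNat x rfl h0 hx
    have r2 : pvReach n k x (PySem.Int.mod (n - 1 - x) k) :=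
      Relation.ReflTransGen.trans hmirror
        (pvReach_mod n k h1 (n - 1 - x).toNat (n - 1 - x) rfl (by omega) (by omega))
    rcases min_cases (PySem.Int.mod x k) (PySem.Int.mod (n - 1 - x) k) with ⟨he, _⟩|⟨he, _⟩
    · rw [he]; exact r1
    · rw [he]; exact r2
  · simp only [if_neg h1]
    rcases min_cases x (n - 1 - x) with ⟨he, _⟩|⟨he, _⟩
    · rw [he]
      exact Relation.ReflTransGen.refl
    · rw [he]; exact hmirror

theorem pvConnect (n k x y : Int) (hk : 0 ≤ k) (h0 : 0 ≤ x) (hx : x < n)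
    (h0' : 0 ≤ y) (hy : y < n) (hlab : pvLab n k x = pvLab n k y) : pvReach n k x y := by
  have r1 := pvReach_lab n k x hk h0 hx
  have r2 := pvReach_lab n k y hk h0' hy
  rw [hlab] at r1
  exact Relation.ReflTransGen.trans r1
    ((Relation.ReflTransGen.symmetric (pvE_symm n k)) r2)

-- ---------- the neighbour-scan loop ----------

theorem pvFoldNb : ∀ (ns : List Int) (v : List Bool) (st : List Int),
    (∀ x ∈ ns, 0 ≤ x ∧ x < (v.length : Int)) →
    ∃ new : List Int,
      (ns.foldl pvStep (v, st)).2 = new ++ st ∧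
      new.Nodup ∧
      (∀ x ∈ new, x ∈ ns ∧ v.getD x.toNat false = false) ∧
      (ns.foldl pvStep (v, st)).1.length = v.length ∧
      (∀ j : Nat, j < v.length →
        ((ns.foldl pvStep (v, st)).1.getD j false = true ↔
          v.getD j false = true ∨ (j : Int) ∈ new)) ∧
      (∀ x ∈ ns, (ns.foldl pvStep (v, st)).1.getD x.toNat false = true) := by
  intro ns
  induction ns with
  | nil =>
      intro v st _
      exact ⟨[], by simp, by simp, by simp, by simp, fun j _ => by simp, by simp⟩
  | cons nb ns ih =>
      intro v st hns
      obtain ⟨hnb0, hnblt⟩ := hns nb (by simp)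
      have hnbN : nb.toNat < v.length := by omega
      by_cases h : PySem.List.pyGetD v nb true = false
      · have hvnb : v.getD nb.toNat false = false := by
          rw [pvGetBridge v nb true hnb0] at h
          rw [pvGetDD v nb.toNat hnbN false true]; exact h
        have hset : PySem.List.pySetD v nb true = v.set nb.toNat true :=
          PySem.List.pySetD_of_nonneg v true hnb0
        have hfold : (nb :: ns).foldl pvStep (v, st)
            = ns.foldl pvStep (v.set nb.toNat true, nb :: st) := by
          simp [pvStep, h, hset]
        have hlen' : (v.set nb.toNat true).length = v.length := by simp
        obtain ⟨new', h1, h2, h3, h4, h5, h6⟩ :=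
          ih (v.set nb.toNat true) (nb :: st) (by
            intro x hx; have := hns x (by simp [hx]); omega)
        refine ⟨new' ++ [nb], ?_, ?_, ?_, ?_, ?_, ?_⟩
        · rw [hfold, h1]; simp
        · have hnotin : nb ∉ new' := by
            intro hmem
            have := (h3 nb hmem).2
            rw [pvSetGetD v nb.toNat nb.toNat true false hnbN] at this
            simp at this
          simp [List.nodup_append, h2, hnotin]
          exact fun a ha hab => hnotin (hab ▸ ha)
        · intro x hx
          rcases List.mem_append.1 hx with hx'|hx'
          · obtain ⟨hxin, hxfalse⟩ := h3 x hx'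
            have hx0 : 0 ≤ x := (hns x (by simp [hxin])).1
            have hne : x.toNat ≠ nb.toNat := by
              intro heq
              rw [heq, pvSetGetD v nb.toNat nb.toNat true false hnbN] at hxfalse
              simp at hxfalse
            rw [pvSetGetD v nb.toNat x.toNat true false hnbN, if_neg hne] at hxfalse
            exact ⟨by simp [hxin], hxfalse⟩
          · simp at hx'
            subst hx'
            exact ⟨by simp, hvnb⟩
        · rw [hfold, h4, hlen']
        · intro j hj
          rw [hfold]
          rw [h5 j (by omega)]
          rw [pvSetGetD v nb.toNat j true false hnbN]
          by_cases hjeq : j = nb.toNat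
          · subst hjeq
            simp only [if_pos rfl]
            constructor
            · intro _; right; simp [Int.toNat_of_nonneg hnb0]
            · intro _; left; rfl
          · rw [if_neg hjeq]
            have hjne : (j : Int) ≠ nb := by
              intro heq; apply hjeq; omega
            constructor
            · rintro (hv | hmem)
              · exact Or.inl hv
              · exact Or.inr (by simp [hmem])
            · rintro (hv | hmem)
              · exact Or.inl hv
              · rcases List.mem_append.1 hmem with hm|hm
                · exact Or.inr hm
                · simp at hm; exact absurd hm hjne
        · intro x hx
          rcases List.mem_cons.1 hx with hx'|hx'
          · subst hx'
            rw [hfold]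
            have hmlt : x.toNat < (ns.foldl pvStep (v.set x.toNat true, x :: st)).1.length := by
              rw [h4, hlen']; exact hnbN
            rw [h5 x.toNat (by rw [hlen'] at *; exact hnbN)]
            left
            rw [pvSetGetD v x.toNat x.toNat true false hnbN]; simp
          · rw [hfold]
            exact h6 x hx'
      · have hvnb : v.getD nb.toNat false = true := by
          rw [pvGetBridge v nb true hnb0] at h
          rw [pvGetDD v nb.toNat hnbN false true]
          cases hb : v.getD nb.toNat true
          · exact absurd hb h
          · rfl
        have hfold : (nb :: ns).foldl pvStep (v, st) = ns.foldl pvStep (v, st) := by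
          simp [pvStep, h]
        obtain ⟨new', h1, h2, h3, h4, h5, h6⟩ :=
          ih v st (by intro x hx; exact hns x (by simp [hx]))
        refine ⟨new', by rw [hfold]; exact h1, h2, ?_, by rw [hfold]; exact h4,
          by rw [hfold]; exact h5, ?_⟩
        · intro x hx
          obtain ⟨hxin, hxf⟩ := h3 x hx
          exact ⟨by simp [hxin], hxf⟩
        · intro x hx
          rcases List.mem_cons.1 hx with hx'|hx'
          · subst hx'
            rw [hfold, h5 x.toNat hnbN]
            exact Or.inl hvnb
          · rw [hfold]; exact h6 x hx'

-- ---------- DFS collects exactly one component ----------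

theorem pvStepEq :
    (fun (p : List Bool × List Int) nb =>
      if PySem.List.pyGetD p.1 nb true = false then
        (PySem.List.pySetD p.1 nb true, nb :: p.2)
      else p) = pvStep := rfl

theorem pvDfs (cs : List Char) (k c : Int) (hk : 0 ≤ k) :
    ∀ (μ : Nat) (v : List Bool) (stack P : List Int) (comp : List Char),
      2 * v.count false + stack.length < μ →
      v.length = cs.length →
      (∀ x ∈ P ++ stack, 0 ≤ x ∧ x < (cs.length : Int) ∧ pvLab (cs.length : Int) k x = c) →
      (∀ x ∈ P ++ stack, v.getD x.toNat false = true) →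
      (P ++ stack).Nodup →
      (∀ x ∈ P, ∀ y, pvE (cs.length : Int) k x y → v.getD y.toNat false = true) →
      ∃ (P' : List Int) (v'' : List Bool),
        dfsA cs (pvAdjUpTo (cs.length : Int) k (cs.length : Int)) v stack comp
          = (v'', comp ++ P'.map (pvCharAt cs)) ∧
        v''.length = cs.length ∧
        (∀ j : Nat, j < cs.length →
          (v''.getD j false = true ↔ v.getD j false = true ∨ (j : Int) ∈ P')) ∧
        (∀ x ∈ P', 0 ≤ x ∧ x < (cs.length : Int) ∧ pvLab (cs.length : Int) k x = c) ∧
        (∀ x ∈ stack, x ∈ P') ∧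
        (P ++ P').Nodup ∧
        (∀ x, (x ∈ P ∨ x ∈ P') → ∀ y, pvE (cs.length : Int) k x y →
          v''.getD y.toNat false = true) := by
  have hn0 : (0:Int) ≤ (cs.length : Int) := by positivity
  have hadj := pvAdj_mem (cs.length : Int) k hn0
  intro μ
  induction μ using Nat.strong_induction_on with
  | _ μ ih =>
    intro v stack P comp hμ hlen hPS hmark hnd hclosed
    cases stack with
    | nil =>
        refine ⟨[], v, by rw [dfsA]; simp, hlen, by intro j _; simp, by simp, by simp,
          by simpa using hnd, ?_⟩
        intro x hx y hE
        rcases hx with hx|hx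
        · exact hclosed x hx y hE
        · simp at hx
    | cons curr rest =>
        obtain ⟨hc0, hcn, hclab⟩ := hPS curr (by simp)
        have hcmark : v.getD curr.toNat false = true := hmark curr (by simp)
        have hnsrange : ∀ x ∈ (pvAdjUpTo (cs.length : Int) k (cs.length : Int)).getD curr [],
            0 ≤ x ∧ x < (v.length : Int) := by
          intro x hx
          have := pvE_range _ _ _ _ hk ((hadj curr x).1 hx)
          omega
        obtain ⟨new, h1, h2, h3, h4, h5, h6⟩ :=
          pvFoldNb ((pvAdjUpTo (cs.length : Int) k (cs.length : Int)).getD curr []) v rest hnsrange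
        -- bounds and labels for everything in the next state
        have hnewE : ∀ x ∈ new, pvE (cs.length : Int) k curr x := by
          intro x hx
          exact (hadj curr x).1 (h3 x hx).1
        have hnewlab : ∀ x ∈ new, 0 ≤ x ∧ x < (cs.length : Int) ∧
            pvLab (cs.length : Int) k x = c := by
          intro x hx
          have hE := hnewE x hx
          have hb := pvE_range _ _ _ _ hk hE
          exact ⟨hb.2.2.1, hb.2.2.2, by rw [← pvLab_pres _ _ _ _ hk hE, hclab]⟩
        have hnewfresh : ∀ x ∈ new, v.getD x.toNat false = false := fun x hx => (h3 x hx).2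
        -- measure decreases
        have hmeas : 2 * ((((pvAdjUpTo (cs.length : Int) k (cs.length : Int)).getD curr []).foldl
              pvStep (v, rest)).1.count false) +
            ((((pvAdjUpTo (cs.length : Int) k (cs.length : Int)).getD curr []).foldl
              pvStep (v, rest)).2.length) ≤ 2 * v.count false + rest.length := by
          rw [← pvStepEq]
          exact pvFoldMeasure _ v rest
        -- invariant for the recursive call
        have hmem' : ∀ x, x ∈ (P ++ [curr]) ++
            ((((pvAdjUpTo (cs.length : Int) k (cs.length : Int)).getD curr []).foldl
              pvStep (v, rest)).2) ↔ (x ∈ P ∨ x = curr ∨ x ∈ new ∨ x ∈ rest) := by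
          intro x
          rw [h1]
          simp [or_assoc]
        obtain ⟨Q, v'', hEq, hlen'', hchar, hQc, hstQ, hndQ, hclQ⟩ :=
          ih (2 * v.count false + (curr :: rest).length) hμ
            ((((pvAdjUpTo (cs.length : Int) k (cs.length : Int)).getD curr []).foldl
              pvStep (v, rest)).1)
            ((((pvAdjUpTo (cs.length : Int) k (cs.length : Int)).getD curr []).foldl
              pvStep (v, rest)).2)
            (P ++ [curr]) (comp ++ [PySem.List.pyGetD cs curr ' '])
            (by simp at hmeas ⊢; omega)
            (by rw [h4]; exact hlen)
            (by
              intro x hx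
              rw [hmem'] at hx
              rcases hx with hx|hx|hx|hx
              · exact hPS x (by simp [hx])
              · subst hx; exact ⟨hc0, hcn, hclab⟩
              · exact hnewlab x hx
              · exact hPS x (by simp [hx]))
            (by
              intro x hx
              rw [hmem'] at hx
              rcases hx with hx'|hx'|hx'|hx'
              · -- old marks survive
                have hb := hPS x (by simp [hx'])
                have hjlt : x.toNat < cs.length := by omega
                rw [h5 x.toNat (by omega)]
                exact Or.inl (hmark x (by simp [hx']))
              · subst hx'
                rw [h5 x.toNat (by omega)]
                exact Or.inl hcmark
              · exact h6 x (h3 x hx').1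
              · have hb := hPS x (by simp [hx'])
                rw [h5 x.toNat (by omega)]
                exact Or.inl (hmark x (by simp [hx'])))
            (by
              -- Nodup of (P ++ [curr]) ++ (new ++ rest)
              rw [h1]
              have hfresh : new.Disjoint (P ++ curr :: rest) := by
                intro a ha hb
                have hm := hmark a hb
                rw [hnewfresh a ha] at hm
                exact Bool.false_ne_true hm
              have e1 : P ++ [curr] ++ (new ++ rest) = ((P ++ [curr]) ++ new) ++ rest := by simp
              have e3 : (new ++ (P ++ [curr])) ++ rest = new ++ (P ++ curr :: rest) := by simp
              have hperm : (P ++ [curr] ++ (new ++ rest)).Perm (new ++ (P ++ curr :: rest)) := by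
                rw [e1, ← e3]
                exact List.perm_append_comm.append_right rest
              exact (hperm.nodup_iff).2 (h2.append hnd hfresh))
            (by
              intro x hx y hE
              have hyb := pvE_range _ _ _ _ hk hE
              rcases List.mem_append.1 hx with hx'|hx'
              · have := hclosed x hx' y hE
                rw [h5 y.toNat (by omega)]
                exact Or.inl this
              · simp at hx'; subst hx'
                exact h6 y ((hadj x y).2 hE))
        refine ⟨curr :: Q, v'', ?_, hlen'', ?_, ?_, ?_, ?_, ?_⟩
        · rw [dfsA, pvStepEq]
          rw [hEq]
          simp [pvCharAt]
        · intro j hj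
          rw [hchar j hj, h5 j (by omega)]
          constructor
          · rintro ((hv|hnew)|hQ)
            · exact Or.inl hv
            · exact Or.inr (by simp [hstQ _ (by rw [h1]; exact List.mem_append.2 (Or.inl hnew))])
            · exact Or.inr (by simp [hQ])
          · rintro (hv|hcq)
            · exact Or.inl (Or.inl hv)
            · rcases List.mem_cons.1 hcq with hq|hq
              · left; left
                have : j = curr.toNat := by omega
                rw [this]; exact hcmark
              · exact Or.inr hq
        · intro x hx
          rcases List.mem_cons.1 hx with hx'|hx'
          · subst hx'; exact ⟨hc0, hcn, hclab⟩
          · exact hQc x hx'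
        · intro x hx
          rcases List.mem_cons.1 hx with hx'|hx'
          · subst hx'; exact List.mem_cons_self
          · exact List.mem_cons_of_mem _
              (hstQ x (by rw [h1]; exact List.mem_append.2 (Or.inr hx')))
        · have : P ++ curr :: Q = (P ++ [curr]) ++ Q := by simp
          rw [this]; exact hndQ
        · intro x hx y hE
          rcases hx with hx'|hx'
          · exact hclQ x (Or.inl (by simp [hx'])) y hE
          · rcases List.mem_cons.1 hx' with hq|hq
            · subst hq; exact hclQ x (Or.inl (by simp)) y hE
            · exact hclQ x (Or.inr hq) y hE

-- ---------- cost is permutation-invariant ----------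

theorem pvMaxD_perm (l l' : List Int) (h : l.Perm l') :
    (PySem.List.max? l (fun x => x)).getD 0 = (PySem.List.max? l' (fun x => x)).getD 0 := by
  cases hl : PySem.List.max? l (fun x => x) with
  | none =>
      rw [(PySem.List.max?_eq_none_iff l _).1 hl] at h
      rw [(PySem.List.max?_eq_none_iff l' _).2 (h.nil_eq).symm]
  | some m =>
      cases hl' : PySem.List.max? l' (fun x => x) with
      | none =>
          rw [(PySem.List.max?_eq_none_iff l' _).1 hl'] at h
          rw [List.perm_nil] at h
          rw [h] at hl
          simp [PySem.List.max?] at hl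
      | some m' =>
          have hm := PySem.List.max?_mem hl
          have hm' := PySem.List.max?_mem hl'
          have h1 := PySem.List.max?_isMax hl m' (h.mem_iff.2 hm')
          have h2 := PySem.List.max?_isMax hl' m (h.mem_iff.1 hm)
          simpa using (le_antisymm h1 h2).symm

theorem pvCost_perm (l l' : List Char) (h : l.Perm l') : pvCost l = pvCost l' := by
  unfold pvCost
  rw [h.length_eq]
  have hv : ((PySem.Dict.counter l).values).Perm ((PySem.Dict.counter l').values) := by
    have hkeys : (PySem.Set.ofList l).Perm (PySem.Set.ofList l') := by
      rw [List.perm_ext_iff_of_nodup (PySem.Set.nodup_ofList l) (PySem.Set.nodup_ofList l')]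
      intro a
      rw [PySem.Set.mem_ofList, PySem.Set.mem_ofList]
      exact h.mem_iff
    have hva : (PySem.Dict.counter l).values
        = (PySem.Set.ofList l).map (fun c => (l.count c : Int)) := by
      show ((PySem.Dict.counter l).items).map (fun p => p.2) = _
      rw [PySem.Dict.items_counter]
      simp
    have hvb : (PySem.Dict.counter l').values
        = (PySem.Set.ofList l').map (fun c => (l'.count c : Int)) := by
      show ((PySem.Dict.counter l').items).map (fun p => p.2) = _
      rw [PySem.Dict.items_counter]
      simp
    rw [hva, hvb]
    have : (PySem.Set.ofList l').map (fun c => (l.count c : Int))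
        = (PySem.Set.ofList l').map (fun c => (l'.count c : Int)) := by
      apply List.map_congr_left
      intro a _
      rw [h.count_eq]
    rw [← this]
    exact hkeys.map _
  rw [pvMaxD_perm _ _ hv]

-- ---------- the outer loop ----------

theorem pvOuterFold_succ (cs : List Char) (k : Int) (m : Nat) :
    pvOuterFold cs k ((m:Int)+1)
      = (if PySem.List.pyGetD (pvOuterFold cs k (m:Int)).1 (m:Int) true = false then
          (let v1 := PySem.List.pySetD (pvOuterFold cs k (m:Int)).1 (m:Int) true
           let res := dfsA cs (pvAdjUpTo (cs.length : Int) k (cs.length : Int)) v1 [(m:Int)] []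
           let cnt : PySem.Dict Char Int := PySem.Dict.counter res.2
           let mcf := (PySem.List.max? cnt.values (fun x => x)).getD 0
           (res.1, (pvOuterFold cs k (m:Int)).2 + ((res.2.length : Int) - mcf)))
        else pvOuterFold cs k (m:Int)) := by
  unfold pvOuterFold
  rw [PySem.List.pyRange_one_succ_right (by omega : (0:Int) ≤ (m:Int)), List.foldl_append]
  rfl

theorem pvOuter (cs : List Char) (k : Int) (hk : 0 ≤ k) :
    ∀ (m : Nat), m ≤ cs.length →
      (pvOuterFold cs k (m : Int)).1.length = cs.length ∧
      (∀ j : Nat, j < cs.length →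
        ((pvOuterFold cs k (m : Int)).1.getD j false = true ↔
          ∃ i : Int, 0 ≤ i ∧ i < (m : Int) ∧
            pvLab (cs.length : Int) k (j : Int) = pvLab (cs.length : Int) k i)) ∧
      (pvOuterFold cs k (m : Int)).2
        = pvTotal cs k (PySem.List.dedup
            ((PySem.List.pyRange 0 (m : Int) 1).map (pvLab (cs.length : Int) k))) := by
  intro m
  induction m with
  | zero =>
      intro _
      refine ⟨by simp [pvOuterFold, PySem.List.pyRange_one_eq_nil (by omega : (0:Int) ≤ 0)],
        ?_, ?_⟩
      · intro j hj
        simp [pvOuterFold, PySem.List.pyRange_one_eq_nil (by omega : (0:Int) ≤ 0),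
          List.getD_eq_getElem?_getD, List.getElem?_replicate, hj]
        intro i h0 hi; omega
      · simp [pvOuterFold, PySem.List.pyRange_one_eq_nil (by omega : (0:Int) ≤ 0), pvTotal,
          pvTotal]
  | succ m ih =>
      intro hm1
      obtain ⟨hlen, hmarked, htot⟩ := ih (by omega)
      have hmlt : m < cs.length := by omega
      have hmn : ((m:Int)) < (cs.length : Int) := by exact_mod_cast hmlt
      have hcond : PySem.List.pyGetD (pvOuterFold cs k (m:Int)).1 (m:Int) true
          = (pvOuterFold cs k (m:Int)).1.getD m false := by
        rw [pvGetBridge _ _ _ (by omega : (0:Int) ≤ (m:Int))]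
        rw [Int.toNat_natCast]
        exact (pvGetDD _ m (by rw [hlen]; exact hmlt) true false)
      by_cases hvis : (pvOuterFold cs k (m:Int)).1.getD m false = true
      · -- index m already visited: the branch does not fire
        obtain ⟨i0, hi00, hi0m, hi0lab⟩ := (hmarked m hmlt).1 hvis
        have hstep : pvOuterFold cs k ((m:Int)+1) = pvOuterFold cs k (m:Int) := by
          rw [pvOuterFold_succ]
          rw [if_neg (by rw [hcond, hvis]; simp)]
        have hcast : (((m+1:Nat)) : Int) = (m:Int)+1 := by push_cast; ring
        rw [hcast, hstep]
        have hlabsm : PySem.List.dedup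
            ((PySem.List.pyRange 0 ((m:Int)+1) 1).map (pvLab (cs.length : Int) k))
            = PySem.List.dedup
            ((PySem.List.pyRange 0 (m:Int) 1).map (pvLab (cs.length : Int) k)) := by
          rw [PySem.List.pyRange_one_succ_right (by omega : (0:Int) ≤ (m:Int)), List.map_append]
          simp only [List.map_cons, List.map_nil, PySem.List.dedup_eq_ofList]
          rw [PySem.Set.ofList_append_singleton]
          apply PySem.Set.add_of_mem
          rw [PySem.Set.mem_ofList]
          exact List.mem_map.2 ⟨i0, PySem.List.mem_pyRange_one.2 ⟨hi00, hi0m⟩, hi0lab.symm⟩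
        refine ⟨hlen, ?_, by rw [htot, hlabsm]⟩
        intro j hj
        rw [hmarked j hj]
        constructor
        · rintro ⟨i, h0, hiltm, hlab⟩
          exact ⟨i, h0, by omega, hlab⟩
        · rintro ⟨i, h0, hiltm, hlab⟩
          by_cases him : i < (m:Int)
          · exact ⟨i, h0, him, hlab⟩
          · have : i = (m:Int) := by omega
            subst this
            exact ⟨i0, hi00, hi0m, by rw [hlab, hi0lab]⟩
      · -- index m unvisited: the DFS collects the whole component of m
        have hvis' : (pvOuterFold cs k (m:Int)).1.getD m false = false := by
          cases hb : (pvOuterFold cs k (m:Int)).1.getD m false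
          · rfl
          · exact absurd hb hvis
        have hnew : ¬ ∃ i : Int, 0 ≤ i ∧ i < (m:Int) ∧
            pvLab (cs.length : Int) k ((m:Nat) : Int) = pvLab (cs.length : Int) k i := by
          intro hex
          rw [← hmarked m hmlt] at hex
          rw [hex] at hvis'
          simp at hvis'
        -- the marked-set after setting m
        have hv1len : ((pvOuterFold cs k (m:Int)).1.set ((m:Int)).toNat true).length
            = cs.length := by simp [hlen]
        have hset : PySem.List.pySetD (pvOuterFold cs k (m:Int)).1 (m:Int) true
            = (pvOuterFold cs k (m:Int)).1.set ((m:Int)).toNat true :=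
          PySem.List.pySetD_of_nonneg _ true (by omega)
        obtain ⟨P', v'', hEq, hlen'', hchar, hQc, hstQ, hndQ, hclQ⟩ :=
          pvDfs cs k (pvLab (cs.length : Int) k (m:Int)) hk
            (2 * ((pvOuterFold cs k (m:Int)).1.set ((m:Int)).toNat true).count false + 2)
            ((pvOuterFold cs k (m:Int)).1.set ((m:Int)).toNat true)
            [(m:Int)] [] []
            (by simp)
            hv1len
            (by
              intro x hx
              simp at hx
              subst hx
              exact ⟨by omega, hmn, rfl⟩)
            (by
              intro x hx
              simp at hx
              subst hx
              rw [pvSetGetD _ _ _ _ _ (by rw [hlen]; exact hmlt)]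
              simp)
            (by simp)
            (by simp)
        -- membership in P' is exactly membership in the component of m
        have hP'mem : ∀ x : Int, x ∈ P' ↔ (0 ≤ x ∧ x < (cs.length : Int) ∧
            pvLab (cs.length : Int) k x = pvLab (cs.length : Int) k (m:Int)) := by
          intro x
          constructor
          · exact hQc x
          · rintro ⟨hx0, hxn, hxlab⟩
            have hstepP : ∀ a b : Int, a ∈ P' → pvE (cs.length : Int) k a b → b ∈ P' := by
              intro a b ha hE
              have hb := pvE_range _ _ _ _ hk hE
              have hmB := hclQ a (Or.inr ha) b hE
              have hbcast : ((b.toNat : Nat) : Int) = b := Int.toNat_of_nonneg (by omega)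
              rw [hchar b.toNat (by omega)] at hmB
              rcases hmB with hv1|hp'
              · rw [pvSetGetD _ _ _ _ _ (by rw [hlen]; exact hmlt)] at hv1
                by_cases hbm : b.toNat = ((m:Int)).toNat
                · have hbeq : b = (m:Int) := by omega
                  rw [hbeq]
                  exact hstQ (m:Int) (by simp)
                · rw [if_neg hbm] at hv1
                  exfalso
                  obtain ⟨i, hi0, him, hilab⟩ := (hmarked b.toNat (by omega)).1 hv1
                  apply hnew
                  refine ⟨i, hi0, him, ?_⟩
                  rw [← hilab, hbcast]
                  have := pvLab_pres _ _ _ _ hk hE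
                  have hlaba := (hQc a ha).2.2
                  rw [← this, hlaba]
              · rw [hbcast] at hp'
                exact hp'
            have hreachP : ∀ z : Int, pvReach (cs.length : Int) k (m:Int) z → z ∈ P' := by
              intro z h
              induction h with
              | refl => exact hstQ (m:Int) (by simp)
              | tail hr hE ihr => exact hstepP _ _ ihr hE
            exact hreachP x (pvConnect (cs.length : Int) k (m:Int) x hk (by omega) hmn hx0 hxn
              hxlab.symm)
        have hP'nodup : P'.Nodup := by simpa using hndQ
        -- P' is a permutation of the index list of the component
        have hperm : P'.Perm ((PySem.List.pyRange 0 (cs.length : Int) 1).filter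
            (fun j => pvLab (cs.length : Int) k j == pvLab (cs.length : Int) k (m:Int))) := by
          rw [List.perm_ext_iff_of_nodup hP'nodup
            (List.Nodup.filter _ (PySem.List.nodup_pyRange_one _ _))]
          intro a
          rw [hP'mem a, List.mem_filter, PySem.List.mem_pyRange_one]
          constructor
          · rintro ⟨h1, h2, h3⟩
            exact ⟨⟨h1, h2⟩, by simp [h3]⟩
          · rintro ⟨⟨h1, h2⟩, h3⟩
            simp at h3
            exact ⟨h1, h2, h3⟩
        -- now compute the step
        have hstep : pvOuterFold cs k ((m:Int)+1)
            = (v'', (pvOuterFold cs k (m:Int)).2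
                + pvCost (pvChars cs k (pvLab (cs.length : Int) k (m:Int)))) := by
          rw [pvOuterFold_succ]
          rw [if_pos (by rw [hcond, hvis'])]
          show ((dfsA cs (pvAdjUpTo (cs.length : Int) k (cs.length : Int))
              (PySem.List.pySetD (pvOuterFold cs k (m:Int)).1 (m:Int) true) [(m:Int)] []).1,
            (pvOuterFold cs k (m:Int)).2
              + (((dfsA cs (pvAdjUpTo (cs.length : Int) k (cs.length : Int))
                    (PySem.List.pySetD (pvOuterFold cs k (m:Int)).1 (m:Int) true)
                    [(m:Int)] []).2.length : Int)
                - (PySem.List.max? (PySem.Dict.counter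
                    (dfsA cs (pvAdjUpTo (cs.length : Int) k (cs.length : Int))
                      (PySem.List.pySetD (pvOuterFold cs k (m:Int)).1 (m:Int) true)
                      [(m:Int)] []).2).values (fun x => x)).getD 0)) = _
          rw [hset, hEq]
          simp only [List.nil_append]
          have hcost : ((P'.map (pvCharAt cs)).length : Int)
              - (PySem.List.max? (PySem.Dict.counter (P'.map (pvCharAt cs))).values
                  (fun x => x)).getD 0
              = pvCost (pvChars cs k (pvLab (cs.length : Int) k (m:Int))) := by
            have := pvCost_perm (P'.map (pvCharAt cs))
              (pvChars cs k (pvLab (cs.length : Int) k (m:Int))) (by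
                unfold pvChars
                exact hperm.map (pvCharAt cs))
            rw [← this]
            rfl
          rw [hcost]
        have hcast : (((m+1:Nat)) : Int) = (m:Int)+1 := by push_cast; ring
        rw [hcast, hstep]
        have hlabsm : PySem.List.dedup
            ((PySem.List.pyRange 0 ((m:Int)+1) 1).map (pvLab (cs.length : Int) k))
            = PySem.List.dedup
              ((PySem.List.pyRange 0 (m:Int) 1).map (pvLab (cs.length : Int) k))
              ++ [pvLab (cs.length : Int) k (m:Int)] := by
          rw [PySem.List.pyRange_one_succ_right (by omega : (0:Int) ≤ (m:Int)), List.map_append]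
          simp only [List.map_cons, List.map_nil, PySem.List.dedup_eq_ofList]
          rw [PySem.Set.ofList_append_singleton]
          apply PySem.Set.add_of_not_mem
          rw [PySem.Set.mem_ofList]
          intro hmem
          obtain ⟨i, hi, hlab⟩ := List.mem_map.1 hmem
          rw [PySem.List.mem_pyRange_one] at hi
          exact hnew ⟨i, hi.1, hi.2, hlab.symm⟩
        refine ⟨hlen'', ?_, ?_⟩
        · intro j hj
          rw [hchar j hj]
          rw [pvSetGetD _ _ _ _ _ (by rw [hlen]; exact hmlt)]
          constructor
          · rintro (hv1|hp')
            · by_cases hjm : j = ((m:Int)).toNat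
              · refine ⟨(m:Int), by omega, by omega, ?_⟩
                have : (j:Int) = (m:Int) := by omega
                rw [this]
              · rw [if_neg hjm] at hv1
                obtain ⟨i, hi0, him, hilab⟩ := (hmarked j hj).1 hv1
                exact ⟨i, hi0, by omega, hilab⟩
            · obtain ⟨_, _, hlab⟩ := (hP'mem _).1 hp'
              exact ⟨(m:Int), by omega, by omega, hlab⟩
          · rintro ⟨i, hi0, him1, hilab⟩
            by_cases him : i < (m:Int)
            · left
              have hv := (hmarked j hj).2 ⟨i, hi0, him, hilab⟩
              split_ifs with hjm
              · rfl
              · exact hv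
            · have : i = (m:Int) := by omega
              subst this
              right
              exact (hP'mem _).2 ⟨by omega, by exact_mod_cast hj, hilab⟩
        · rw [htot, hlabsm]
          unfold pvTotal
          rw [List.foldl_append]
          simp

-- ---------- B evaluates to the same label-indexed sum ----------

theorem pvB_eq (s : String) (k : Int) :
    get_min_changes_alt s k
      = pvTotal s.toList k (PySem.List.dedup
          ((PySem.List.pyRange 0 (s.toList.length : Int) 1).map
            (pvLab (s.toList.length : Int) k))) := by
  show (((PySem.List.enumerate s.toList 0).foldl
        (fun g p => g.modify (pvLab (s.toList.length : Int) k p.1) [] (· ++ [p.2]))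
        (PySem.Dict.empty : PySem.Dict Int (List Char))).values).foldl
      (fun tot chars => tot + ((chars.length : Int)
        - (PySem.List.max? (PySem.Dict.counter chars).values (fun x => x)).getD 0)) 0
    = _
  rw [PySem.List.enumerate_eq_map_pyRange s.toList ' ']
  simp only [PySem.List.len_eq]
  have hPL : List.foldl
        (fun g p => g.modify (pvLab ((s.toList.length : Nat) : Int) k p.1) [] fun x => x ++ [p.2])
        (PySem.Dict.empty : PySem.Dict Int (List Char))
        (List.map (fun j => (j, PySem.List.pyGetD s.toList j ' '))
          (PySem.List.pyRange 0 ((s.toList.length : Nat) : Int)))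
      = List.foldl (fun g p => g.modify p.1 [] fun x => x ++ [p.2])
          (PySem.Dict.empty : PySem.Dict Int (List Char))
          (List.map (fun j => (pvLab ((s.toList.length : Nat) : Int) k j, pvCharAt s.toList j))
            (PySem.List.pyRange 0 ((s.toList.length : Nat) : Int))) := by
    rw [List.foldl_map, List.foldl_map]
    rfl
  rw [hPL]
  have hnodup : (List.foldl (fun g p => g.modify p.1 [] fun x => x ++ [p.2])
      (PySem.Dict.empty : PySem.Dict Int (List Char))
      (List.map (fun j => (pvLab ((s.toList.length : Nat) : Int) k j, pvCharAt s.toList j))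
        (PySem.List.pyRange 0 ((s.toList.length : Nat) : Int)))).keys.Nodup := by
    have := PySem.Dict.nodup_keys_foldl_modify_key
      (List.map (fun j => (pvLab ((s.toList.length : Nat) : Int) k j, pvCharAt s.toList j))
        (PySem.List.pyRange 0 ((s.toList.length : Nat) : Int)))
      (fun p => p.1) ([] : List Char) (fun _ p => fun x => x ++ [p.2])
      (PySem.Dict.empty : PySem.Dict Int (List Char)) (by simp [PySem.Dict.keys_empty])
    exact this
  have hkeys : (List.foldl (fun g p => g.modify p.1 [] fun x => x ++ [p.2])
      (PySem.Dict.empty : PySem.Dict Int (List Char))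
      (List.map (fun j => (pvLab ((s.toList.length : Nat) : Int) k j, pvCharAt s.toList j))
        (PySem.List.pyRange 0 ((s.toList.length : Nat) : Int)))).keys
      = PySem.Set.ofList ((PySem.List.pyRange 0 ((s.toList.length : Nat) : Int)).map
          (pvLab ((s.toList.length : Nat) : Int) k)) := by
    have := PySem.Dict.keys_foldl_modify_key
      (List.map (fun j => (pvLab ((s.toList.length : Nat) : Int) k j, pvCharAt s.toList j))
        (PySem.List.pyRange 0 ((s.toList.length : Nat) : Int)))
      (fun p => p.1) ([] : List Char) (fun _ p => fun x => x ++ [p.2])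
      (PySem.Dict.empty : PySem.Dict Int (List Char))
    rw [this]
    rw [show (PySem.Dict.empty : PySem.Dict Int (List Char)).keys = [] from rfl]
    rw [PySem.Set.update_nil_left, List.map_map]
    rfl
  have hgetD : ∀ c, (List.foldl (fun g p => g.modify p.1 [] fun x => x ++ [p.2])
      (PySem.Dict.empty : PySem.Dict Int (List Char))
      (List.map (fun j => (pvLab ((s.toList.length : Nat) : Int) k j, pvCharAt s.toList j))
        (PySem.List.pyRange 0 ((s.toList.length : Nat) : Int)))).getD c []
      = pvChars s.toList k c := by
    intro c
    rw [PySem.Dict.getD_foldl_modify_append]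
    rw [List.filter_map, List.map_map]
    simp only [PySem.Dict.getD_empty, List.nil_append]
    rfl
  rw [PySem.Dict.values_eq_map_keys _ hnodup ([] : List Char)]
  rw [List.foldl_map]
  simp only [hgetD, hkeys]
  unfold pvTotal
  simp only [PySem.List.dedup_eq_ofList]
  rfl

-- ===== VERDICT (by name: the statement is the Claim_ definition above) =====
theorem get_min_changes_spec : Claim_equal_get_min_changes := by
  intro s k _hdom hk
  unfold Spec_get_min_changes
  rw [pvA_eq_outer s k, pvB_eq s k]
  have h := (pvOuter s.toList k hk s.toList.length le_rfl).2.2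
  simpa using h
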